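-- pv_equiv track=rewrite | github.com/altermarkive/training | hackerrank/test_collections_counter.py | accountant
-- ===== SOURCE A (Python) =====
-- import collections
--
-- def accountant(sizes, requests):
--     counted = collections.Counter()
--     counted.update(sizes)
--     haul = 0
--     for size, price in requests:
--         if counted[size] > 0:
--             haul += price
--             counted[size] -= 1
--     return haul
-- ===== SOURCE B (Python) =====
-- def accountant(sizes, requests):
--     # A request at position i is fulfillable iff the number of earlier
--     # requests for the same size is below the stock of that size.
--     return sum(price for i, (size, price) in enumerate(requests)
--                if sum(1 for s, _ in requests[:i] if s == size) < sizes.count(size))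
-- ===== Notes on version B (the rewrite author's own statement) =====
-- stated objective: alternative
-- what changed: Replaces the streaming mutable Counter (decremented per sale) with a stateless closed-form test per request: request i is counted iff the number of earlier same-size requests is below sizes.count(size); single comprehension, no mutable state.
import Mathlib
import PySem

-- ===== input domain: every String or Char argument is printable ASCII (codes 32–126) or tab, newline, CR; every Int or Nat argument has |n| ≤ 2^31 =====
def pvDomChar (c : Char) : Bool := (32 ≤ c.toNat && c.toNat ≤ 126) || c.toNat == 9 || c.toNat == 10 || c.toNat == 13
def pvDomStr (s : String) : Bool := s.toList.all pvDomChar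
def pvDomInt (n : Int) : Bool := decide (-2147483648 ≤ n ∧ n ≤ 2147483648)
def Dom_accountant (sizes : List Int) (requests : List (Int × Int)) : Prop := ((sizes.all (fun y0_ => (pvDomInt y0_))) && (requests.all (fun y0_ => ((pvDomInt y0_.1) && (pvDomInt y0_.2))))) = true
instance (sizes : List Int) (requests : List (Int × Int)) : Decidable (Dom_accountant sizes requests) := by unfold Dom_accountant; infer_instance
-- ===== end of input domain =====

-- B replaces A's streaming decremented Counter with a stateless per-request test
-- (earlier same-size requests < stock); alternative decomposition, same return value.

-- ===== PORT A =====
-- counted = Counter(); counted.update(sizes); then stream over requests with (dict, haul) state.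
def accountant (sizes : List Int) (requests : List (Int × Int)) : Int :=
  let counted : PySem.Dict Int Int :=
    sizes.foldl (fun d x => d.modify x 0 (· + 1)) PySem.Dict.empty
  (requests.foldl
    (fun st sp =>
      if st.1.getD sp.1 0 > 0 then
        (st.1.insert sp.1 (st.1.getD sp.1 0 - 1), st.2 + sp.2)
      else st)
    (counted, (0 : Int))).2

-- ===== PORT B =====
-- sum over enumerate(requests): count price iff earlier same-size requests (requests[:i]) < sizes.count(size)
def accountant_alt (sizes : List Int) (requests : List (Int × Int)) : Int :=
  (PySem.List.enumerate requests 0).foldl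
    (fun acc ip =>
      if (((PySem.List.slice requests none (some ip.1)).countP
            (fun sp => sp.1 == ip.2.1) : Int) < (PySem.List.count sizes ip.2.1 : Int))
      then acc + ip.2.2 else acc)
    0

-- ===== PRECONDITION & SPEC =====
def Spec_accountant (sizes : List Int) (requests : List (Int × Int)) (out : Int) : Prop := out = accountant_alt sizes requests
instance (sizes : List Int) (requests : List (Int × Int)) (out : Int) : Decidable (Spec_accountant sizes requests out) := by unfold Spec_accountant; infer_instance

-- ===== CLAIM (what is proved, stated in full; the proofs are below) =====
def Claim_equal_accountant : Prop := ∀ (sizes : List Int) (requests : List (Int × Int)), Dom_accountant sizes requests → Spec_accountant sizes requests (accountant sizes requests)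

-- ===== LEMMAS AND PROOFS =====

-- Loop correspondence: if the dict holds stock minus (capped) already-served count of the
-- prefix `pre`, then A's fold over `rest` equals B's fold over `enumerate rest |pre|`
-- (slicing the full list pre ++ rest).
theorem accountant_loop_eq (sizes : List Int) :
    ∀ (rest pre : List (Int × Int)) (d : PySem.Dict Int Int) (haul : Int),
    (∀ s : Int, d.getD s 0 =
        (sizes.count s : Int) - min ((pre.countP (fun sp => sp.1 == s)) : Int) ((sizes.count s : Int))) →
    (rest.foldl
      (fun st sp =>
        if st.1.getD sp.1 0 > 0 then
          (st.1.insert sp.1 (st.1.getD sp.1 0 - 1), st.2 + sp.2)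
        else st)
      (d, haul)).2 =
    (PySem.List.enumerate rest (pre.length : Int)).foldl
      (fun acc ip =>
        if (((PySem.List.slice (pre ++ rest) none (some ip.1)).countP
              (fun sp => sp.1 == ip.2.1) : Int) < (PySem.List.count sizes ip.2.1 : Int))
        then acc + ip.2.2 else acc)
      haul := by
  intro rest
  induction rest with
  | nil => intro pre d haul _; simp [PySem.List.enumerate]
  | cons sp rest' ih =>
    intro pre d haul hinv
    obtain ⟨s, p⟩ := sp
    rw [PySem.List.enumerate_cons]
    simp only [List.foldl_cons]
    have hslice : PySem.List.slice (pre ++ (s, p) :: rest') none (some (pre.length : Int)) = pre := by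
      rw [PySem.List.slice_to_natCast]; simp
    have hcnt : (0 : Int) ≤ (sizes.count s : Int) := by positivity
    have hpc := hinv s
    have hcond : (d.getD s 0 > 0) ↔
        ((pre.countP (fun sp => sp.1 == s) : Int) < (sizes.count s : Int)) := by
      rw [hpc]; omega
    have hassoc : pre ++ (s, p) :: rest' = (pre ++ [(s, p)]) ++ rest' := by simp
    have hlen : ((pre ++ [(s, p)]).length : Int) = (pre.length : Int) + 1 := by simp
    by_cases hfire : (pre.countP (fun sp => sp.1 == s) : Int) < (sizes.count s : Int)
    · rw [if_pos (hcond.mpr hfire), hslice,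
        if_pos (by simpa [PySem.List.count] using hfire)]
      have hnew : ∀ s' : Int, (d.insert s (d.getD s 0 - 1)).getD s' 0 =
          (sizes.count s' : Int) -
            min (((pre ++ [(s, p)]).countP (fun sp => sp.1 == s')) : Int) ((sizes.count s' : Int)) := by
        intro s'
        rw [PySem.Dict.getD_insert, List.countP_append]
        by_cases hss : s' = s
        · rw [if_pos hss, hss, hpc]
          have h1 : ([(s, p)].countP (fun sp => sp.1 == s)) = 1 := by
            simp
          rw [h1]
          push_cast
          omega
        · rw [if_neg hss]
          have h0 : ([(s, p)].countP (fun sp => sp.1 == s')) = 0 := by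
            simp [List.countP_singleton, beq_iff_eq]
            exact fun h => absurd h.symm hss
          rw [h0, hinv s']
          simp
      have hih := ih (pre ++ [(s, p)]) (d.insert s (d.getD s 0 - 1)) (haul + p) hnew
      rw [hassoc, ← hlen]
      simpa using hih
    · rw [if_neg (fun h => hfire (hcond.mp h)), hslice,
        if_neg (by simpa [PySem.List.count] using hfire)]
      have hnew : ∀ s' : Int, d.getD s' 0 =
          (sizes.count s' : Int) -
            min (((pre ++ [(s, p)]).countP (fun sp => sp.1 == s')) : Int) ((sizes.count s' : Int)) := by
        intro s'
        rw [List.countP_append]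
        by_cases hss : s' = s
        · rw [hss, hpc]
          have h1 : ([(s, p)].countP (fun sp => sp.1 == s)) = 1 := by
            simp
          rw [h1]
          push_cast
          omega
        · have h0 : ([(s, p)].countP (fun sp => sp.1 == s')) = 0 := by
            simp [List.countP_singleton, beq_iff_eq]
            exact fun h => absurd h.symm hss
          rw [h0, hinv s']
          simp
      have hih := ih (pre ++ [(s, p)]) d haul hnew
      rw [hassoc, ← hlen]
      simpa using hih

-- ===== VERDICT (by name: the statement is the Claim_ definition above) =====
theorem accountant_spec : Claim_equal_accountant := by
  intro sizes requests _
  unfold Spec_accountant accountant accountant_alt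
  have hcounter : sizes.foldl (fun d x => d.modify x 0 (· + 1)) PySem.Dict.empty
      = PySem.Dict.counter sizes := (PySem.Dict.counter_eq_foldl sizes).symm
  rw [hcounter]
  have := accountant_loop_eq sizes requests [] (PySem.Dict.counter sizes) 0 ?_
  · simpa using this
  · intro s
    rw [PySem.Dict.getD_counter]
    simp
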